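-- pv_equiv track=rewrite | github.com/ZetItUp/diff_os | tools/elf2dex.py | classify_section
-- ===== SOURCE A (Python) =====
-- TEXT_PREFIXES = (
--     ".text", ".init", ".fini", ".plt",
--     ".gnu.linkonce.t", ".stub"
-- )
--
-- RO_PREFIXES = (
--     ".rodata", ".gnu.linkonce.r",
--     ".eh_frame", ".gcc_except_table",
--     ".note", ".comment", ".interp"  # harmless if present
-- )
--
-- DATA_PREFIXES = (
--     ".data", ".sdata",
--     ".data.rel", ".data.rel.ro", ".data.rel.ro.local",
--     ".got", ".got.plt", ".got2",
--     ".bss.rel.ro",  # some toolchains generate this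
--     ".ctors", ".dtors", ".jcr",
--     ".init_array", ".fini_array",
--     ".tm_clone_table",
--     ".dynamic", ".idata"  # if ever present, treat as data
-- )
--
-- BSS_PREFIXES = (
--     ".bss", ".sbss", ".tbss"
-- )
--
-- def classify_section(name: str):
--     for p in TEXT_PREFIXES:
--         if name == p or name.startswith(p + "."):
--             return "text"
--     for p in RO_PREFIXES:
--         if name == p or name.startswith(p + "."):
--             return "ro"
--     for p in DATA_PREFIXES:
--         if name == p or name.startswith(p + "."):
--             return "data"
--     for p in BSS_PREFIXES:
--         if name == p or name.startswith(p + "."):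
--             return "bss"
--     # default: ignore (debug, symtabs, etc.)
--     return None
-- ===== SOURCE B (Python) =====
-- # One pass over the name with a prefix->category table: keep the latest (longest)
-- # dot-boundary prefix found in the table, then let an exact full-name hit win.
-- PREFIX_MAP = {
--     ".text": "text", ".init": "text", ".fini": "text", ".plt": "text",
--     ".gnu.linkonce.t": "text", ".stub": "text",
--     ".rodata": "ro", ".gnu.linkonce.r": "ro", ".eh_frame": "ro",
--     ".gcc_except_table": "ro", ".note": "ro", ".comment": "ro", ".interp": "ro",
--     ".data": "data", ".sdata": "data", ".data.rel": "data", ".data.rel.ro": "data",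
--     ".data.rel.ro.local": "data", ".got": "data", ".got.plt": "data", ".got2": "data",
--     ".bss.rel.ro": "data", ".ctors": "data", ".dtors": "data", ".jcr": "data",
--     ".init_array": "data", ".fini_array": "data", ".tm_clone_table": "data",
--     ".dynamic": "data", ".idata": "data",
--     ".bss": "bss", ".sbss": "bss", ".tbss": "bss",
-- }
--
-- def classify_section(name: str):
--     best = None
--     for i, ch in enumerate(name):
--         if ch == ".":
--             hit = PREFIX_MAP.get(name[:i])
--             if hit is not None:
--                 best = hit
--     hit = PREFIX_MAP.get(name)
--     return hit if hit is not None else best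
-- ===== Notes on version B (the rewrite author's own statement) =====
-- stated objective: alternative
-- what changed: Replaces A's four ordered prefix-tuple scans (each testing equality or startswith with the prefix plus a dot) by a single prefix-to-category dictionary consulted once per dot boundary in one pass over the name, keeping the latest (longest) hit; longest-match agrees with A's scan order because the only pair of nested prefixes from different categories is the bss-prefix nested inside a data-prefix, and A checks the data tuple first.
import Mathlib
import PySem

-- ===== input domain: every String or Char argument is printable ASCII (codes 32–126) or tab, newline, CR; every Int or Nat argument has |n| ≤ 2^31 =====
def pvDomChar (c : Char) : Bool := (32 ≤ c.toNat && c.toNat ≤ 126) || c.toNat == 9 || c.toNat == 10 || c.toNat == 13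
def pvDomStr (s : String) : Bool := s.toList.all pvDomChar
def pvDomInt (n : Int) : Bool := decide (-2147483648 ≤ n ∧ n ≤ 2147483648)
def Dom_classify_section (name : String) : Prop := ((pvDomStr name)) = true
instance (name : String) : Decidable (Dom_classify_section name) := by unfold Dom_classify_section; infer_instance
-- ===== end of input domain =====

set_option maxRecDepth 16384


-- B replaces A's four ordered prefix-tuple scans by one prefix→category table consulted
-- at each dot boundary of the name in a single pass (longest hit wins); alternative, not faster.

-- ===== PORT A =====
def TEXT_PREFIXES : List String := [".text", ".init", ".fini", ".plt", ".gnu.linkonce.t", ".stub"]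
def RO_PREFIXES : List String := [".rodata", ".gnu.linkonce.r", ".eh_frame", ".gcc_except_table", ".note", ".comment", ".interp"]
def DATA_PREFIXES : List String := [".data", ".sdata", ".data.rel", ".data.rel.ro", ".data.rel.ro.local", ".got", ".got.plt", ".got2", ".bss.rel.ro", ".ctors", ".dtors", ".jcr", ".init_array", ".fini_array", ".tm_clone_table", ".dynamic", ".idata"]
def BSS_PREFIXES : List String := [".bss", ".sbss", ".tbss"]

-- the shared body of A's four identical loops: 'for p in ps: if name == p or name.startswith(p + "."): return <cat>'
def pvScanA (name : String) : List String → Bool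
  | [] => false
  | p :: rest =>
    if name == p || PySem.Str.startswith name (p ++ ".") then true
    else pvScanA name rest

def classify_section (name : String) : Option String :=
  if pvScanA name TEXT_PREFIXES then some "text"
  else if pvScanA name RO_PREFIXES then some "ro"
  else if pvScanA name DATA_PREFIXES then some "data"
  else if pvScanA name BSS_PREFIXES then some "bss"
  else none

-- ===== PORT B =====
def PREFIX_MAP : PySem.Dict String String := PySem.Dict.ofList
  [(".text", "text"), (".init", "text"), (".fini", "text"), (".plt", "text"),
   (".gnu.linkonce.t", "text"), (".stub", "text"),
   (".rodata", "ro"), (".gnu.linkonce.r", "ro"), (".eh_frame", "ro"),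
   (".gcc_except_table", "ro"), (".note", "ro"), (".comment", "ro"), (".interp", "ro"),
   (".data", "data"), (".sdata", "data"), (".data.rel", "data"), (".data.rel.ro", "data"),
   (".data.rel.ro.local", "data"), (".got", "data"), (".got.plt", "data"), (".got2", "data"),
   (".bss.rel.ro", "data"), (".ctors", "data"), (".dtors", "data"), (".jcr", "data"),
   (".init_array", "data"), (".fini_array", "data"), (".tm_clone_table", "data"),
   (".dynamic", "data"), (".idata", "data"),
   (".bss", "bss"), (".sbss", "bss"), (".tbss", "bss")]

def classify_section_alt (name : String) : Option String :=
  let best := (PySem.List.enumerate name.toList 0).foldl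
    (fun best ic =>
      if ic.2 == '.' then
        match PySem.Dict.get? PREFIX_MAP (PySem.Str.slice name none (some ic.1)) with
        | some hit => some hit
        | none => best
      else best) none
  match PySem.Dict.get? PREFIX_MAP name with
  | some hit => some hit
  | none => best

-- ===== PRECONDITION & SPEC =====
def Spec_classify_section (name : String) (out : Option String) : Prop := out = classify_section_alt name
instance (name : String) (out : Option String) : Decidable (Spec_classify_section name out) := by unfold Spec_classify_section; infer_instance

-- ===== CLAIM (what is proved, stated in full; the proofs are below) =====
def Claim_equal_classify_section : Prop := ∀ (name : String), Dom_classify_section name → Spec_classify_section name (classify_section name)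

-- ===== LEMMAS AND PROOFS =====

-- proof-side views of both programs, over List Char
def TEXTL : List (List Char) := TEXT_PREFIXES.map String.toList
def ROL : List (List Char) := RO_PREFIXES.map String.toList
def DATAL : List (List Char) := DATA_PREFIXES.map String.toList
def BSSL : List (List Char) := BSS_PREFIXES.map String.toList
def KEYSL : List (List Char) := TEXTL ++ ROL ++ DATAL ++ BSSL

-- "prefix k matches name l" (A's per-prefix test)
def mtcL (k l : List Char) : Bool := l == k || PySem.Chars.startswith l (k ++ ['.'])

-- table lookup, list-level
def lkpL (l : List Char) : Option String := PySem.Dict.get? PREFIX_MAP (String.ofList l)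

-- "k is k₀ or a dot-closed proper prefix of k₀"
def cmpB (k k₀ : List Char) : Bool := k == k₀ || (k ++ ['.']).isPrefixOf k₀

-- what A computes once every match test is rewritten through cmpB · k₀ (k₀ = longest match)
def AconcL (k₀ : List Char) : Option String :=
  if TEXTL.any (cmpB · k₀) then some "text"
  else if ROL.any (cmpB · k₀) then some "ro"
  else if DATAL.any (cmpB · k₀) then some "data"
  else if BSSL.any (cmpB · k₀) then some "bss"
  else none

-- A, list-level
def AcharL (l : List Char) : Option String :=
  if TEXTL.any (mtcL · l) then some "text"
  else if ROL.any (mtcL · l) then some "ro"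
  else if DATAL.any (mtcL · l) then some "data"
  else if BSSL.any (mtcL · l) then some "bss"
  else none

-- B's accumulator after the first n characters: last table hit at a dot boundary
def auxL (l : List Char) : Nat → Option String
  | 0 => none
  | n+1 =>
    if l[n]? = some '.' then
      match lkpL (l.take n) with
      | some c => some c
      | none => auxL l n
    else auxL l n

-- B's loop body, list-level
def stepL (l : List Char) (best : Option String) (ic : Int × Char) : Option String :=
  if ic.2 == '.' then
    match lkpL (PySem.List.slice l none (some ic.1)) with
    | some c => some c
    | none => best
  else best

-- B, list-level
def BcharL (l : List Char) : Option String :=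
  match lkpL l with
  | some c => some c
  | none => auxL l l.length

lemma beq_toList (s t : String) : (s == t) = (s.toList == t.toList) := by
  rw [Bool.eq_iff_iff, beq_iff_eq, beq_iff_eq, String.toList_inj]

lemma scanA_eq (name : String) (ps : List String) :
    pvScanA name ps = (ps.map String.toList).any (fun k => mtcL k name.toList) := by
  induction ps with
  | nil => rfl
  | cons p rest ih =>
    have hdot : (p ++ ".").toList = p.toList ++ ['.'] := by
      rw [String.toList_append]; rfl
    have hc : (name == p || PySem.Str.startswith name (p ++ ".")) = mtcL p.toList name.toList := by
      rw [mtcL, beq_toList, PySem.Str.startswith_eq, hdot]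
    simp only [pvScanA, List.map, List.any_cons, ← hc, ih]
    cases h : (name == p || PySem.Str.startswith name (p ++ ".")) <;> simp

lemma A_to_list (name : String) : classify_section name = AcharL name.toList := by
  simp only [classify_section, AcharL, scanA_eq, TEXTL, ROL, DATAL, BSSL]
  rfl

lemma get?_eq_lkp (s : String) : PySem.Dict.get? PREFIX_MAP s = lkpL s.toList := by
  rw [lkpL, String.ofList_toList]

lemma foldB (l : List Char) : ∀ n, n ≤ l.length →
    (PySem.List.enumerate (l.take n) 0).foldl (stepL l) none = auxL l n := by
  intro n
  induction n with
  | zero => intro _; rfl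
  | succ n ih =>
    intro hn
    have hlt : n < l.length := by omega
    rw [List.take_succ_eq_append_getElem hlt, PySem.List.enumerate_append, List.foldl_append]
    rw [ih (by omega)]
    have hlen : ((l.take n).length : Int) = (n : Int) := by
      simp [List.length_take, Nat.min_eq_left (le_of_lt hlt)]
    simp only [PySem.List.enumerate_cons, PySem.List.enumerate_nil, List.foldl_cons, List.foldl_nil]
    show stepL l (auxL l n) (0 + ((l.take n).length : Int), l[n]) = auxL l (n + 1)
    rw [stepL, auxL]
    have hsl : PySem.List.slice l none (some (0 + ((l.take n).length : Int))) = l.take n := by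
      rw [hlen, zero_add, PySem.List.slice_to_natCast]
    rw [hsl, List.getElem?_eq_getElem hlt]
    by_cases hdot : l[n] = '.' <;> simp [hdot]

lemma B_to_list (name : String) : classify_section_alt name = BcharL name.toList := by
  have hstep : (fun (best : Option String) (ic : Int × Char) =>
      if ic.2 == '.' then
        match PySem.Dict.get? PREFIX_MAP (PySem.Str.slice name none (some ic.1)) with
        | some hit => some hit
        | none => best
      else best) = stepL name.toList := by
    funext best ic
    have hsl : (PySem.Str.slice name none (some ic.1)).toList
        = PySem.List.slice name.toList none (some ic.1) := by
      simp [pysem]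
    rw [stepL, get?_eq_lkp, hsl]
  rw [classify_section_alt, BcharL, hstep, get?_eq_lkp]
  have h := foldB name.toList name.toList.length (le_refl _)
  rw [List.take_length] at h
  rw [h]

lemma mtc_iff (k l : List Char) : mtcL k l = true ↔ l = k ∨ k ++ ['.'] <+: l := by
  simp [mtcL, PySem.Chars.startswith_iff]

lemma cmp_iff (k k₀ : List Char) : cmpB k k₀ = true ↔ k = k₀ ∨ k ++ ['.'] <+: k₀ := by
  simp [cmpB, List.isPrefixOf_iff_prefix]

lemma prefix_of_mtc {k l : List Char} (h : mtcL k l = true) : k <+: l := by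
  rcases (mtc_iff k l).mp h with h | h
  · exact h ▸ List.prefix_refl k
  · exact List.IsPrefix.trans (List.prefix_append k ['.']) h

-- two matched prefixes of the same name are comparable, at a dot boundary
lemma chain_of_max {k k₀ l : List Char} (hk : mtcL k l = true) (h0 : mtcL k₀ l = true)
    (hlen : k.length ≤ k₀.length) : cmpB k k₀ = true := by
  rw [cmp_iff]
  rcases (mtc_iff k l).mp hk with hk' | hk'
  · left
    subst hk'
    have h0p : k₀ <+: l := prefix_of_mtc h0
    exact ((List.IsPrefix.eq_of_length_le h0p hlen)).symm
  · rcases (mtc_iff k₀ l).mp h0 with h0' | h0'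
    · right; rw [← h0']; exact hk'
    · rcases Nat.lt_or_ge k.length k₀.length with hlt | hge
      · right
        have h1 : (k ++ ['.']).length ≤ k₀.length := by simp; omega
        exact List.prefix_of_prefix_length_le hk' (prefix_of_mtc h0) h1
      · left
        have : k.length = k₀.length := le_antisymm hlen hge
        have hkp : k <+: k₀ ∨ k₀ <+: k :=
          List.prefix_or_prefix_of_prefix (prefix_of_mtc hk) (prefix_of_mtc h0)
        rcases hkp with h | h
        · exact List.IsPrefix.eq_of_length_le h (by omega)
        · exact (List.IsPrefix.eq_of_length_le h (by omega)).symm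

lemma mem_of_lkp {l : List Char} (h : (lkpL l).isSome = true) : l ∈ KEYSL := by
  have hne : PySem.Dict.get? PREFIX_MAP (String.ofList l) ≠ none := by
    rw [lkpL] at h
    intro hc; rw [hc] at h; simp at h
  have hmem : String.ofList l ∈ PREFIX_MAP.keys := by
    by_contra hc
    exact hne ((PySem.Dict.get?_eq_none_iff_not_mem_keys PREFIX_MAP (String.ofList l)).mpr hc)
  have h2 : (String.ofList l).toList ∈ PREFIX_MAP.keys.map String.toList :=
    List.mem_map_of_mem hmem
  rw [String.toList_ofList] at h2
  have h3 : PREFIX_MAP.keys.map String.toList = KEYSL := by decide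
  rwa [h3] at h2

lemma mtc_take {l : List Char} {n : Nat} (hn : l[n]? = some '.') : mtcL (l.take n) l = true := by
  obtain ⟨hlt, hv⟩ := List.getElem?_eq_some_iff.mp hn
  rw [mtc_iff]; right
  have : l.take n ++ ['.'] = l.take (n + 1) := by
    rw [List.take_succ_eq_append_getElem hlt, hv]
  rw [this]
  exact List.take_prefix (n + 1) l

-- the concrete per-key facts: A's chain evaluated through cmpB agrees with the table, and
-- every key is in the table
lemma master : ∀ k₀ ∈ KEYSL, AconcL k₀ = lkpL k₀ ∧ (lkpL k₀).isSome = true := by decide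

lemma exists_max_match (l : List Char) (ks : List (List Char))
    (h : ∃ k ∈ ks, mtcL k l = true) :
    ∃ k₀, k₀ ∈ ks ∧ mtcL k₀ l = true ∧ ∀ k ∈ ks, mtcL k l = true → k.length ≤ k₀.length := by
  induction ks with
  | nil => simp at h
  | cons a t ih =>
    by_cases hex : ∃ k ∈ t, mtcL k l = true
    · obtain ⟨k₀, hm, hk, hmax⟩ := ih hex
      cases hA : mtcL a l
      · exact ⟨k₀, List.mem_cons_of_mem a hm, hk, by
          intro k hkm hkt
          rcases List.mem_cons.mp hkm with rfl | hkm
          · rw [hA] at hkt; exact Bool.noConfusion hkt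
          · exact hmax k hkm hkt⟩
      · rcases Nat.le_total a.length k₀.length with hle | hle
        · exact ⟨k₀, List.mem_cons_of_mem a hm, hk, by
            intro k hkm hkt
            rcases List.mem_cons.mp hkm with rfl | hkm
            · exact hle
            · exact hmax k hkm hkt⟩
        · exact ⟨a, List.mem_cons_self, hA, by
            intro k hkm hkt
            rcases List.mem_cons.mp hkm with rfl | hkm
            · exact le_refl _
            · exact le_trans (hmax k hkm hkt) hle⟩
    · obtain ⟨k, hkm, hkt⟩ := h
      rcases List.mem_cons.mp hkm with rfl | hkm
      · exact ⟨k, List.mem_cons_self, hkt, by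
          intro k' hk'm hk't
          rcases List.mem_cons.mp hk'm with rfl | hk'm
          · exact le_refl _
          · exact absurd ⟨k', hk'm, hk't⟩ hex⟩
      · exact absurd ⟨k, hkm, hkt⟩ hex

lemma aux_none {l : List Char} (hS : ∀ k ∈ KEYSL, mtcL k l = false) :
    ∀ n, auxL l n = none := by
  intro n
  induction n with
  | zero => rfl
  | succ n ih =>
    rw [auxL]
    by_cases hd : l[n]? = some '.'
    · rw [if_pos hd]
      cases hlk : lkpL (l.take n) with
      | none => exact ih
      | some c =>
        have hmem : l.take n ∈ KEYSL := mem_of_lkp (by rw [hlk]; rfl)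
        have := hS _ hmem
        rw [mtc_take hd] at this
        exact Bool.noConfusion this
    · rw [if_neg hd]; exact ih

-- B's scan returns the hit at the highest dot boundary; above j₀ there are no hits
lemma aux_stable {l : List Char} {j₀ : Nat}
    (hnh : ∀ j, j₀ < j → ¬ (l[j]? = some '.' ∧ (lkpL (l.take j)).isSome = true)) :
    ∀ n, j₀ + 1 ≤ n → auxL l n = auxL l (j₀ + 1) := by
  intro n
  induction n with
  | zero => intro h; omega
  | succ n ih =>
    intro h
    rcases Nat.lt_or_ge (j₀ + 1) (n + 1) with hlt | hge
    · have hn : j₀ < n := by omega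
      rw [auxL]
      by_cases hd : l[n]? = some '.'
      · rw [if_pos hd]
        cases hlk : lkpL (l.take n) with
        | none => exact ih (by omega)
        | some c => exact absurd ⟨hd, by rw [hlk]; rfl⟩ (hnh n hn)
      · rw [if_neg hd]; exact ih (by omega)
    · have : n + 1 = j₀ + 1 := by omega
      rw [this]

lemma main_list (l : List Char) : AcharL l = BcharL l := by
  by_cases hS : ∀ k ∈ KEYSL, mtcL k l = false
  · -- nothing matches: both sides are none
    have hany : ∀ ks : List (List Char), (∀ k ∈ ks, k ∈ KEYSL) → ks.any (mtcL · l) = false := by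
      intro ks hsub
      rw [List.any_eq_false]
      intro k hk
      rw [hS k (hsub k hk)]
      exact Bool.false_ne_true
    have hlkp : lkpL l = none := by
      cases hlk : lkpL l with
      | none => rfl
      | some c =>
        have hmem : l ∈ KEYSL := mem_of_lkp (by rw [hlk]; rfl)
        have hml : mtcL l l = true := by rw [mtc_iff]; left; rfl
        rw [hS l hmem] at hml
        exact Bool.noConfusion hml
    rw [AcharL, BcharL, hlkp,
      hany TEXTL (by intro k hk; simp [KEYSL]; tauto),
      hany ROL (by intro k hk; simp [KEYSL]; tauto),
      hany DATAL (by intro k hk; simp [KEYSL]; tauto),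
      hany BSSL (by intro k hk; simp [KEYSL]; tauto)]
    simp [aux_none hS]
  · have hex : ∃ k ∈ KEYSL, mtcL k l = true := by
      by_contra hc
      exact hS (fun k hk => by
        cases h : mtcL k l
        · rfl
        · exact absurd ⟨k, hk, h⟩ hc)
    obtain ⟨k₀, h0m, h0t, hmax⟩ := exists_max_match l KEYSL hex
    obtain ⟨hconc, hsome⟩ := master k₀ h0m
    have h0p : k₀ <+: l := prefix_of_mtc h0t
    -- every match test in A evaluates like the concrete test against k₀
    have hmtc : ∀ k' ∈ KEYSL, mtcL k' l = cmpB k' k₀ := by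
      intro k' hk'
      rw [Bool.eq_iff_iff]
      constructor
      · intro h
        exact chain_of_max h h0t (hmax k' hk' h)
      · intro h
        rcases (cmp_iff k' k₀).mp h with rfl | h
        · exact h0t
        · rw [mtc_iff]; right; exact List.IsPrefix.trans h h0p
    have hA : AcharL l = AconcL k₀ := by
      rw [AcharL, AconcL,
        PySem.List.any_congr_mem (fun k' hk' => hmtc k' (by simp [KEYSL]; tauto)),
        PySem.List.any_congr_mem (fun k' hk' => hmtc k' (by simp [KEYSL]; tauto)),
        PySem.List.any_congr_mem (fun k' hk' => hmtc k' (by simp [KEYSL]; tauto)),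
        PySem.List.any_congr_mem (fun k' hk' => hmtc k' (by simp [KEYSL]; tauto))]
    have hB : BcharL l = lkpL k₀ := by
      rcases (mtc_iff k₀ l).mp h0t with heq | hdotp
      · -- the name itself is a key
        have hll : lkpL l = lkpL k₀ := by rw [heq]
        rw [BcharL, hll]
        cases hlk : lkpL k₀ with
        | none => rw [hlk] at hsome; exact Bool.noConfusion hsome
        | some c => rfl
      · -- k₀ ++ "." is a prefix of the name
        have hlen0 : k₀.length + 1 ≤ l.length := by
          have := List.IsPrefix.length_le hdotp
          simp at this; omega
        have hlkl : lkpL l = none := by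
          cases hlk : lkpL l with
          | none => rfl
          | some c =>
            have hmem : l ∈ KEYSL := mem_of_lkp (by rw [hlk]; rfl)
            have hml : mtcL l l = true := by rw [mtc_iff]; left; rfl
            have := hmax l hmem hml
            omega
        obtain ⟨t, ht⟩ := hdotp
        have hdotat : l[k₀.length]? = some '.' := by
          rw [← ht, List.append_assoc, List.getElem?_append_right (le_refl k₀.length)]
          simp
        have htake : l.take k₀.length = k₀ := by
          rw [← ht, List.append_assoc, List.take_left]
        have hnh : ∀ j, k₀.length < j → ¬ (l[j]? = some '.' ∧ (lkpL (l.take j)).isSome = true) := by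
          intro j hj ⟨hd, hs⟩
          obtain ⟨hjlt, -⟩ := List.getElem?_eq_some_iff.mp hd
          have hmem : l.take j ∈ KEYSL := mem_of_lkp hs
          have := hmax _ hmem (mtc_take hd)
          rw [List.length_take, Nat.min_eq_left (le_of_lt hjlt)] at this
          omega
        rw [BcharL, hlkl]
        have h1 : auxL l l.length = auxL l (k₀.length + 1) := aux_stable hnh l.length hlen0
        have h2 : auxL l (k₀.length + 1) = lkpL k₀ := by
          rw [auxL, if_pos hdotat, htake]
          cases hlk : lkpL k₀ with
          | none => rw [hlk] at hsome; exact Bool.noConfusion hsome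
          | some c => rfl
        simp [h1, h2]
    rw [hA, hconc, ← hB]

-- ===== VERDICT (by name: the statement is the Claim_ definition above) =====
theorem classify_section_spec : Claim_equal_classify_section := by
  intro name _
  unfold Spec_classify_section
  rw [A_to_list, B_to_list]
  exact main_list name.toList
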